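-- pv_equiv track=rewrite | github.com/janezaletskaya/algorithms | algorithm_training_2024/week2/J.py | solution
-- ===== SOURCE A (Python) =====
-- from collections import deque
--
-- def solution(lst, starts, k):
--     left_limit = [0] * len(lst)
--     left_limit[0] = 0
--
--     identical_cnt = 0
--     queue = deque()
--
--     for i in range(1, len(lst)):
--         if lst[i] < lst[i - 1]:
--             left_limit[i] = i
--         else:
--             if lst[i] == lst[i - 1]:
--                 identical_cnt += 1
--                 queue.append(i)
--
--                 if len(queue) > k:
--                     idx = queue.popleft()
--                     left_limit[i] = max(idx, left_limit[i - 1])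
--                 else:
--                     left_limit[i] = left_limit[i - 1]
--
--             else:
--                 left_limit[i] = left_limit[i - 1]
--
--     result = []
--     for start in starts:
--         result.append(left_limit[start - 1] + 1)
--
--     return result
-- ===== SOURCE B (Python) =====
-- def solution(lst, starts, k):
--     n = len(lst)
--     # pass 1: dec[i] = latest index j <= i where the value strictly decreases (0 if none)
--     dec = [0]
--     for i in range(1, n):
--         dec.append(i if lst[i] < lst[i - 1] else dec[-1])
--     # pass 2: eqb[i] = boundary forced once more than k equal pairs have accumulated
--     kk = max(k, 0)
--     eq = []
--     eqb = [0]
--     for i in range(1, n):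
--         if lst[i] == lst[i - 1]:
--             eq.append(i)
--         eqb.append(eq[len(eq) - kk - 1] if len(eq) > kk else 0)
--     left_limit = [max(d, e) for d, e in zip(dec, eqb)]
--     return [left_limit[s - 1] + 1 for s in starts]
-- ===== Notes on version B (the rewrite author's own statement) =====
-- stated objective: alternative
-- what changed: A interleaves one stateful loop that maintains a deque and writes left_limit in place; B decomposes the work into two independent passes (a running last-decrease index, and a list of equal-pair indices with a cumulative-count boundary eq[cnt-kk-1]) and combines them pointwise with max, eliminating the deque entirely.
import Mathlib
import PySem

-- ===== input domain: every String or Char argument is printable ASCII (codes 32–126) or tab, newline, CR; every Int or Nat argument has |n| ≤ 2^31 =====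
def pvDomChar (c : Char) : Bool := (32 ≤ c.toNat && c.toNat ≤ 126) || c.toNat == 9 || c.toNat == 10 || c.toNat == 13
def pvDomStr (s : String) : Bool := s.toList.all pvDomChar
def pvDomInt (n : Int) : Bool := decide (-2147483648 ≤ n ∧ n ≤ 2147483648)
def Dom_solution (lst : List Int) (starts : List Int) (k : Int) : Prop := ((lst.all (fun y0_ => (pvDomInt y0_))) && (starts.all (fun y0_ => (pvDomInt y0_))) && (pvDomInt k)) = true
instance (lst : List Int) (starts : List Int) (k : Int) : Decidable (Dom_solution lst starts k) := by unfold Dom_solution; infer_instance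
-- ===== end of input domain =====

-- B replaces A's single stateful deque loop by two independent precomputation passes
-- (last-decrease index; equal-pair indices with a cumulative-count boundary) combined
-- pointwise with max; same O(n + q) cost, no deque ('alternative' decomposition).

-- ===== PORT A =====
-- one iteration of A's "for i in range(1, len(lst))" loop; state = (left_limit, identical_cnt, queue)
def solutionStep (lst : List Int) (k : Int) (st : List Int × Int × List Int) (i : Int) : List Int × Int × List Int :=
  if PySem.List.pyGetD lst i 0 < PySem.List.pyGetD lst (i - 1) 0 then
    (PySem.List.pySetD st.1 i i, st.2.1, st.2.2)
  else if PySem.List.pyGetD lst i 0 = PySem.List.pyGetD lst (i - 1) 0 then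
    let q := st.2.2 ++ [i]
    if (PySem.List.len q) > k then
      (PySem.List.pySetD st.1 i (max (q.headD 0) (PySem.List.pyGetD st.1 (i - 1) 0)), st.2.1 + 1, q.tail)
    else
      (PySem.List.pySetD st.1 i (PySem.List.pyGetD st.1 (i - 1) 0), st.2.1 + 1, q)
  else
    (PySem.List.pySetD st.1 i (PySem.List.pyGetD st.1 (i - 1) 0), st.2.1, st.2.2)

def solution (lst : List Int) (starts : List Int) (k : Int) : List Int :=
  -- left_limit = [0]*len(lst); left_limit[0] = 0  (IndexError on empty lst: excluded by Pre_)
  let ll0 := PySem.List.pySetD (List.replicate lst.length (0 : Int)) 0 0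
  let st := (PySem.List.pyRange 1 (PySem.List.len lst) 1).foldl (solutionStep lst k) (ll0, 0, [])
  starts.map (fun s => (PySem.List.pyGet? st.1 (s - 1)).getD 0 + 1)

-- ===== PORT B =====
-- pass 1: dec[i] = latest index j ≤ i where the value strictly decreases (0 if none)
def altDecStep (lst : List Int) (d : List Int) (i : Int) : List Int :=
  d ++ [if PySem.List.pyGetD lst i 0 < PySem.List.pyGetD lst (i - 1) 0 then i else PySem.List.pyGetD d (-1) 0]

-- pass 2: eq = equal-pair indices so far, eqb = boundary once more than kk of them accumulated
def altEqStep (lst : List Int) (kk : Int) (p : List Int × List Int) (i : Int) : List Int × List Int :=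
  let eq := if PySem.List.pyGetD lst i 0 = PySem.List.pyGetD lst (i - 1) 0 then p.1 ++ [i] else p.1
  (eq, p.2 ++ [if PySem.List.len eq > kk then PySem.List.pyGetD eq (PySem.List.len eq - kk - 1) 0 else 0])

def solution_alt (lst : List Int) (starts : List Int) (k : Int) : List Int :=
  let rng := PySem.List.pyRange 1 (PySem.List.len lst) 1
  let dec := rng.foldl (altDecStep lst) [0]
  let kk := max k 0
  let eqb := (rng.foldl (altEqStep lst kk) ([], [0])).2
  let leftLimit := (dec.zip eqb).map (fun p => max p.1 p.2)
  starts.map (fun s => (PySem.List.pyGet? leftLimit (s - 1)).getD 0 + 1)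

-- ===== PRECONDITION & SPEC =====
-- Pre_ excludes exactly the inputs where A raises IndexError: the empty lst
-- (left_limit[0] = 0 fails) and any start with start-1 outside left_limit's index range.
def Pre_solution (lst : List Int) (starts : List Int) (k : Int) : Prop :=
  lst ≠ [] ∧ ∀ s ∈ starts, PySem.Raise.InRange lst.length (s - 1)
instance (lst : List Int) (starts : List Int) (k : Int) : Decidable (Pre_solution lst starts k) := by unfold Pre_solution; infer_instance

def pvWitness_solution : List Int × List Int × Int := ([3, 1, 1, 1, 2], [1, 3, 5], 1)

def Spec_solution (lst : List Int) (starts : List Int) (k : Int) (out : List Int) : Prop := out = solution_alt lst starts k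
instance (lst : List Int) (starts : List Int) (k : Int) (out : List Int) : Decidable (Spec_solution lst starts k out) := by unfold Spec_solution; infer_instance

-- ===== CLAIM (what is proved, stated in full; the proofs are below) =====
def Claim_equal_solution : Prop := ∀ (lst : List Int) (starts : List Int) (k : Int), Dom_solution lst starts k → Pre_solution lst starts k → Spec_solution lst starts k (solution lst starts k)

-- ===== LEMMAS AND PROOFS =====

-- reference values: decV j = A's left_limit contribution from strict decreases,
-- eqL j = the equal-pair indices among 1..j, eqbV j = the boundary forced by > kk of them
def decV (lst : List Int) : Nat → Int
  | 0 => 0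
  | j+1 => if lst.getD (j+1) 0 < lst.getD j 0 then ((j+1 : Nat) : Int) else decV lst j

def eqL (lst : List Int) : Nat → List Int
  | 0 => []
  | j+1 => if lst.getD (j+1) 0 = lst.getD j 0 then eqL lst j ++ [((j+1 : Nat) : Int)] else eqL lst j

def eqbV (lst : List Int) (k : Int) (j : Nat) : Int :=
  if PySem.List.len (eqL lst j) > max k 0 then
    PySem.List.pyGetD (eqL lst j) (PySem.List.len (eqL lst j) - max k 0 - 1) 0
  else 0

def llV (lst : List Int) (k : Int) (j : Nat) : Int := max (decV lst j) (eqbV lst k j)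

lemma mem_eqL {lst : List Int} {x : Int} {j : Nat} (h : x ∈ eqL lst j) : 1 ≤ x ∧ x ≤ (j : Int) := by
  induction j with
  | zero => simp only [eqL, List.not_mem_nil] at h
  | succ j ih =>
    unfold eqL at h
    split at h
    · rcases List.mem_append.mp h with h' | h'
      · have := ih h'; push_cast at *; omega
      · rw [List.mem_singleton] at h'; subst h'; push_cast; omega
    · have := ih h; push_cast at *; omega

lemma sorted_eqL (lst : List Int) (j : Nat) : (eqL lst j).Pairwise (· < ·) := by
  induction j with
  | zero => simp [eqL]
  | succ j ih =>
    unfold eqL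
    split
    · refine List.pairwise_append.mpr ⟨ih, List.pairwise_singleton _ _, ?_⟩
      intro x hx y hy
      simp at hy; subst hy
      have := mem_eqL hx; omega
    · exact ih

lemma eqbV_bounds (lst : List Int) (k : Int) (j : Nat) : 0 ≤ eqbV lst k j ∧ eqbV lst k j ≤ (j : Int) := by
  unfold eqbV
  split
  · rename_i h
    simp only [PySem.List.len_eq] at h ⊢
    have hmem : PySem.List.pyGetD (eqL lst j) (((eqL lst j).length : Int) - max k 0 - 1) 0 ∈ eqL lst j := by
      apply PySem.List.pyGetD_mem
      constructor <;> omega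
    have := mem_eqL hmem
    omega
  · constructor
    · exact le_refl 0
    · exact_mod_cast Int.natCast_nonneg j

lemma eqL_succ_eq {lst : List Int} {j : Nat} (h : lst.getD (j+1) 0 = lst.getD j 0) :
    eqL lst (j+1) = eqL lst j ++ [((j+1 : Nat) : Int)] := by
  rw [show eqL lst (j+1) = if lst.getD (j+1) 0 = lst.getD j 0 then eqL lst j ++ [((j+1 : Nat) : Int)] else eqL lst j from rfl, if_pos h]

lemma eqL_succ_ne {lst : List Int} {j : Nat} (h : ¬ lst.getD (j+1) 0 = lst.getD j 0) :
    eqL lst (j+1) = eqL lst j := by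
  rw [show eqL lst (j+1) = if lst.getD (j+1) 0 = lst.getD j 0 then eqL lst j ++ [((j+1 : Nat) : Int)] else eqL lst j from rfl, if_neg h]

lemma eqbV_succ_head {lst : List Int} {k : Int} {j : Nat}
    (h : lst.getD (j+1) 0 = lst.getD j 0)
    (hc : ((eqL lst j).length : Int) + 1 > max k 0) :
    eqbV lst k (j+1) =
      ((eqL lst j).drop ((eqL lst j).length - k.toNat) ++ [((j+1 : Nat) : Int)]).headD 0 := by
  have hkn : (k.toNat : Int) = max k 0 := Int.toNat_eq_max k
  unfold eqbV
  rw [eqL_succ_eq h]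
  simp only [PySem.List.len_eq, List.length_append, List.length_cons, List.length_nil]
  rw [if_pos (by push_cast; omega)]
  rw [show (((eqL lst j).length + 1 : Nat) : Int) - max k 0 - 1
        = (((eqL lst j).length - k.toNat : Nat) : Int) from by rw [← hkn]; omega]
  rw [PySem.List.pyGetD_natCast]
  rw [← List.drop_append_of_le_length (by omega : (eqL lst j).length - k.toNat ≤ (eqL lst j).length)]
  rw [List.headD_eq_head?_getD, List.head?_drop, List.getD_eq_getElem?_getD]

lemma eqbV_le_succ {lst : List Int} {k : Int} {j : Nat}
    (h : lst.getD (j+1) 0 = lst.getD j 0) :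
    eqbV lst k j ≤ eqbV lst k (j+1) := by
  have hkn : (k.toNat : Int) = max k 0 := Int.toNat_eq_max k
  by_cases hcj : PySem.List.len (eqL lst j) > max k 0
  · have hE : k.toNat + 1 ≤ (eqL lst j).length := by
      simp only [PySem.List.len_eq] at hcj; omega
    have hlhs : eqbV lst k j = (eqL lst j).getD ((eqL lst j).length - k.toNat - 1) 0 := by
      unfold eqbV
      rw [if_pos hcj]
      simp only [PySem.List.len_eq]
      rw [show ((eqL lst j).length : Int) - max k 0 - 1
            = (((eqL lst j).length - k.toNat - 1 : Nat) : Int) from by rw [← hkn]; omega]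
      rw [PySem.List.pyGetD_natCast]
    have hrhs : eqbV lst k (j+1) =
        (eqL lst j ++ [((j+1 : Nat) : Int)]).getD ((eqL lst j).length - k.toNat) 0 := by
      unfold eqbV
      rw [eqL_succ_eq h]
      simp only [PySem.List.len_eq, List.length_append, List.length_cons, List.length_nil]
      rw [if_pos (by simp only [PySem.List.len_eq] at hcj; push_cast; omega)]
      rw [show (((eqL lst j).length + 1 : Nat) : Int) - max k 0 - 1
            = (((eqL lst j).length - k.toNat : Nat) : Int) from by rw [← hkn]; omega]
      rw [PySem.List.pyGetD_natCast]
    rw [hlhs, hrhs]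
    have hs : (eqL lst (j+1)).Pairwise (· < ·) := sorted_eqL lst (j+1)
    rw [eqL_succ_eq h] at hs
    have h1 : (eqL lst j).length - k.toNat - 1 < (eqL lst j).length := by omega
    have h2 : (eqL lst j).length - k.toNat < (eqL lst j ++ [((j+1 : Nat) : Int)]).length := by
      simp only [List.length_append, List.length_cons, List.length_nil]; omega
    rw [List.getD_eq_getElem _ _ h1, List.getD_eq_getElem _ _ h2]
    rw [← List.getElem_append_left (bs := [((j+1 : Nat) : Int)]) h1]
    exact le_of_lt (List.pairwise_iff_getElem.mp hs _ _
      (by simp only [List.length_append, List.length_cons, List.length_nil]; omega) h2 (by omega))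
    simp only [List.length_append, List.length_cons, List.length_nil]
    omega
  · have h0 : eqbV lst k j = 0 := by unfold eqbV; rw [if_neg hcj]
    rw [h0]
    exact (eqbV_bounds lst k (j+1)).1

lemma B_dec_loop (lst : List Int) (j : Nat) :
    (PySem.List.pyRange 1 ((j : Int) + 1) 1).foldl (altDecStep lst) [0] =
      (List.range (j+1)).map (decV lst) := by
  induction j with
  | zero =>
    rw [PySem.List.pyRange_one_eq_nil (by omega)]
    simp [decV]
  | succ j ih =>
    have hsplit : PySem.List.pyRange 1 ((j : Nat) + 1 + 1 : Int) 1 =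
        PySem.List.pyRange 1 ((j : Int) + 1) 1 ++ [(j : Int) + 1] :=
      PySem.List.pyRange_one_succ_right (by omega)
    push_cast
    rw [hsplit, List.foldl_append, ih]
    have hprev : (List.range (j+1)).map (decV lst) =
        (List.range j).map (decV lst) ++ [decV lst j] := by
      rw [List.range_succ, List.map_append]; rfl
    simp only [List.foldl_cons, List.foldl_nil, altDecStep]
    rw [show ((j : Int) + 1) = ((j + 1 : Nat) : Int) from by push_cast; ring]
    rw [show ((j + 1 : Nat) : Int) - 1 = ((j : Nat) : Int) from by push_cast; ring]
    rw [PySem.List.pyGetD_natCast, PySem.List.pyGetD_natCast]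
    rw [hprev, PySem.List.pyGetD_neg_one_append_singleton, ← hprev]
    rw [List.range_succ (n := j + 1), List.map_append]
    rfl

lemma B_eq_loop (lst : List Int) (k : Int) (j : Nat) :
    (PySem.List.pyRange 1 ((j : Int) + 1) 1).foldl (altEqStep lst (max k 0)) ([], [0]) =
      (eqL lst j, (List.range (j+1)).map (eqbV lst k)) := by
  induction j with
  | zero =>
    rw [PySem.List.pyRange_one_eq_nil (by omega)]
    have : eqbV lst k 0 = 0 := by
      unfold eqbV
      rw [if_neg]
      simp only [eqL, PySem.List.len_eq, List.length_nil]
      omega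
    simp [eqL, this]
  | succ j ih =>
    have hsplit : PySem.List.pyRange 1 ((j : Nat) + 1 + 1 : Int) 1 =
        PySem.List.pyRange 1 ((j : Int) + 1) 1 ++ [(j : Int) + 1] :=
      PySem.List.pyRange_one_succ_right (by omega)
    push_cast
    rw [hsplit, List.foldl_append, ih]
    simp only [List.foldl_cons, List.foldl_nil, altEqStep]
    rw [show ((j : Int) + 1) = ((j + 1 : Nat) : Int) from by push_cast; ring]
    rw [show ((j + 1 : Nat) : Int) - 1 = ((j : Nat) : Int) from by push_cast; ring]
    rw [PySem.List.pyGetD_natCast, PySem.List.pyGetD_natCast]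
    have heq' : (if lst.getD (j+1) 0 = lst.getD j 0 then eqL lst j ++ [((j+1 : Nat) : Int)] else eqL lst j) = eqL lst (j+1) := rfl
    rw [heq']
    rw [List.range_succ (n := j + 1), List.map_append]
    rfl

lemma A_loop (lst : List Int) (k : Int) (j : Nat) (hj : j + 1 ≤ lst.length) :
    (PySem.List.pyRange 1 ((j : Int) + 1) 1).foldl (solutionStep lst k)
        (PySem.List.pySetD (List.replicate lst.length (0 : Int)) 0 0, 0, []) =
      ((List.range (j+1)).map (llV lst k) ++ List.replicate (lst.length - (j+1)) 0,
       ((eqL lst j).length : Int),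
       (eqL lst j).drop ((eqL lst j).length - k.toNat)) := by
  have hkn : (k.toNat : Int) = max k 0 := Int.toNat_eq_max k
  induction j with
  | zero =>
    rw [PySem.List.pyRange_one_eq_nil (by omega)]
    obtain ⟨m, hm⟩ : ∃ m, lst.length = m + 1 := ⟨lst.length - 1, by omega⟩
    have h0 : eqbV lst k 0 = 0 := by
      unfold eqbV; rw [if_neg]; simp only [eqL, PySem.List.len_eq, List.length_nil]; omega
    have hset : PySem.List.pySetD (List.replicate lst.length (0:Int)) 0 0
        = (List.replicate lst.length (0:Int)).set 0 0 := by
      exact_mod_cast PySem.List.pySetD_natCast (List.replicate lst.length (0:Int)) 0 0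
    simp only [List.foldl_nil]
    rw [hset]
    simp only [hm, List.replicate_succ, List.set_cons_zero]
    simp [llV, decV, h0, eqL]
  | succ j ih =>
    have hj' : j + 1 ≤ lst.length := by omega
    have hsplit : PySem.List.pyRange 1 ((j : Nat) + 1 + 1 : Int) 1 =
        PySem.List.pyRange 1 ((j : Int) + 1) 1 ++ [(j : Int) + 1] :=
      PySem.List.pyRange_one_succ_right (by omega)
    push_cast
    rw [hsplit, List.foldl_append, ih hj']
    simp only [List.foldl_cons, List.foldl_nil, solutionStep]
    rw [show ((j : Int) + 1) = ((j + 1 : Nat) : Int) from by push_cast; ring]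
    rw [show ((j + 1 : Nat) : Int) - 1 = ((j : Nat) : Int) from by push_cast; ring]
    simp only [PySem.List.pyGetD_natCast, PySem.List.pySetD_natCast]
    have hllread : ((List.range (j+1)).map (llV lst k) ++
        List.replicate (lst.length-(j+1)) (0:Int)).getD j 0 = llV lst k j := by
      rw [List.getD_append _ _ _ _ (by simp)]
      exact PySem.List.getD_map_range _ _ _ _ (by omega)
    have hsetv : ∀ v : Int, (((List.range (j+1)).map (llV lst k) ++
          List.replicate (lst.length-(j+1)) (0:Int)).set (j+1) v)
        = ((List.range (j+1)).map (llV lst k) ++ [v]) ++ List.replicate (lst.length-(j+2)) 0 := by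
      intro v
      rw [List.set_append_right _ _ (by simp)]
      simp only [List.length_map, List.length_range, Nat.sub_self]
      rw [show lst.length - (j+1) = (lst.length - (j+2)) + 1 from by omega, List.replicate_succ,
        List.set_cons_zero, ← List.append_cons]
    have hpre2 : (List.range (j+1+1)).map (llV lst k)
        = (List.range (j+1)).map (llV lst k) ++ [llV lst k (j+1)] := by
      rw [List.range_succ, List.map_append]; rfl
    have hdec : decV lst (j+1)
        = if lst.getD (j+1) 0 < lst.getD j 0 then ((j+1 : Nat) : Int) else decV lst j := rfl
    rw [hllread]
    split_ifs with hlt heq hpop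
    · -- strict decrease: left_limit[i] = i
      have hne : ¬ lst.getD (j+1) 0 = lst.getD j 0 := ne_of_lt hlt
      have heqb : eqbV lst k (j+1) = eqbV lst k j := by
        unfold eqbV; rw [eqL_succ_ne hne]
      simp only [Prod.mk.injEq]
      refine ⟨?_, ?_, ?_⟩
      · rw [hsetv, hpre2]
        have hb := eqbV_bounds lst k j
        have : llV lst k (j+1) = ((j+1 : Nat) : Int) := by
          unfold llV; rw [hdec, if_pos hlt, heqb]; push_cast at hb ⊢; omega
        rw [this]
      · rw [eqL_succ_ne hne]
      · rw [eqL_succ_ne hne]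
    · -- equal pair, queue overflows: pop and take max with popped index
      have hcond : ((eqL lst j).length : Int) + 1 > max k 0 := by
        simp only [PySem.List.len_eq, List.length_append, List.length_drop,
          List.length_cons, List.length_nil] at hpop
        omega
      have hEk : k.toNat ≤ (eqL lst j).length := by omega
      have hhead := eqbV_succ_head heq hcond
      have hmono := eqbV_le_succ (k := k) heq
      simp only [Prod.mk.injEq]
      refine ⟨?_, ?_, ?_⟩
      · rw [hsetv, hpre2, ← hhead]
        have : max (eqbV lst k (j+1)) (llV lst k j) = llV lst k (j+1) := by
          unfold llV
          rw [hdec, if_neg hlt]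
          omega
        rw [this]
      · rw [eqL_succ_eq heq]
        simp only [List.length_append, List.length_cons, List.length_nil]
        push_cast; ring
      · rw [eqL_succ_eq heq]
        rw [← List.drop_append_of_le_length (by omega : (eqL lst j).length - k.toNat ≤ (eqL lst j).length),
          List.tail_drop]
        simp only [List.length_append, List.length_cons, List.length_nil]
        congr 1
        omega
    · -- equal pair, queue still within k: carry left_limit[i-1]
      have hnc : (eqL lst j).length + 1 ≤ k.toNat := by
        simp only [PySem.List.len_eq, List.length_append, List.length_drop,
          List.length_cons, List.length_nil] at hpop
        omega
      have heqb0 : eqbV lst k j = 0 := by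
        unfold eqbV; rw [if_neg]; simp only [PySem.List.len_eq]; omega
      have heqb0' : eqbV lst k (j+1) = 0 := by
        unfold eqbV; rw [eqL_succ_eq heq, if_neg]
        simp only [PySem.List.len_eq, List.length_append, List.length_cons, List.length_nil]
        omega
      simp only [Prod.mk.injEq]
      refine ⟨?_, ?_, ?_⟩
      · rw [hsetv, hpre2]
        have : llV lst k (j+1) = llV lst k j := by
          unfold llV; rw [hdec, if_neg hlt, heqb0, heqb0']
        rw [this]
      · rw [eqL_succ_eq heq]
        simp only [List.length_append, List.length_cons, List.length_nil]
        push_cast; ring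
      · rw [eqL_succ_eq heq]
        rw [show (eqL lst j).length - k.toNat = 0 from by omega, List.drop_zero]
        rw [show (eqL lst j ++ [((j+1 : Nat) : Int)]).length - k.toNat = 0 from by
          simp only [List.length_append, List.length_cons, List.length_nil]; omega, List.drop_zero]
    · -- strict increase: everything carries over
      have heqb : eqbV lst k (j+1) = eqbV lst k j := by
        unfold eqbV; rw [eqL_succ_ne heq]
      simp only [Prod.mk.injEq]
      refine ⟨?_, ?_, ?_⟩
      · rw [hsetv, hpre2]
        have : llV lst k (j+1) = llV lst k j := by
          unfold llV; rw [hdec, if_neg hlt, heqb]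
        rw [this]
      · rw [eqL_succ_ne heq]
      · rw [eqL_succ_ne heq]

-- ===== VERDICT (by name: the statement is the Claim_ definition above) =====
theorem solution_spec : Claim_equal_solution := by
  intro lst starts k _ hpre
  unfold Spec_solution solution solution_alt
  obtain ⟨j, hn⟩ : ∃ j, lst.length = j + 1 :=
    ⟨lst.length - 1, by cases lst with | nil => exact absurd rfl hpre.1 | cons a l => simp⟩
  have hlen : PySem.List.len lst = (j : Int) + 1 := by rw [PySem.List.len_eq, hn]; push_cast; ring
  dsimp only
  rw [hlen, A_loop lst k j (by omega), B_dec_loop lst j, B_eq_loop lst k j]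
  simp only [hn, Nat.sub_self, List.replicate_zero, List.append_nil, List.zip_map']
  congr 1
  funext s
  congr 2
  rw [List.map_map]
  rfl
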